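-- pv_equiv track=rewrite | github.com/psunlpgroup/FairSumm | dataset_loader/Fewsum_origin.py | cluster_source
-- ===== SOURCE A (Python) =====
-- import collections
--
-- def cluster_source(source, ratings):
--     cluster = collections.defaultdict(list)
--     for s, r in zip(source, ratings):
--         cluster[r].append(s)
--
--     cluster = sorted(cluster.items(), key=lambda x: x[0])
--     new_cluster = [' '.join(x[1]) for x in cluster]
--     new_ratings = [x[0] for x in cluster]
--
--     return new_cluster, new_ratings
-- ===== SOURCE B (Python) =====
-- def cluster_source(source, ratings):
--     # Sort the (string, rating) pairs by rating (stable, so within a rating the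
--     # original order is kept), then join each consecutive run of equal ratings.
--     pairs = sorted(zip(source, ratings), key=lambda p: p[1])
--     new_cluster, new_ratings = [], []
--     i, n = 0, len(pairs)
--     while i < n:
--         r = pairs[i][1]
--         j = i
--         while j < n and pairs[j][1] == r:
--             j += 1
--         new_cluster.append(' '.join(s for s, _ in pairs[i:j]))
--         new_ratings.append(r)
--         i = j
--     return new_cluster, new_ratings
-- ===== Notes on version B (the rewrite author's own statement) =====
-- stated objective: alternative
-- what changed: Replaces the defaultdict-grouping-then-sort-keys strategy with a stable sort of the zipped (string, rating) pairs followed by a single linear run-detection pass that joins each consecutive run of equal ratings; no intermediate dict is built.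
import Mathlib
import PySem

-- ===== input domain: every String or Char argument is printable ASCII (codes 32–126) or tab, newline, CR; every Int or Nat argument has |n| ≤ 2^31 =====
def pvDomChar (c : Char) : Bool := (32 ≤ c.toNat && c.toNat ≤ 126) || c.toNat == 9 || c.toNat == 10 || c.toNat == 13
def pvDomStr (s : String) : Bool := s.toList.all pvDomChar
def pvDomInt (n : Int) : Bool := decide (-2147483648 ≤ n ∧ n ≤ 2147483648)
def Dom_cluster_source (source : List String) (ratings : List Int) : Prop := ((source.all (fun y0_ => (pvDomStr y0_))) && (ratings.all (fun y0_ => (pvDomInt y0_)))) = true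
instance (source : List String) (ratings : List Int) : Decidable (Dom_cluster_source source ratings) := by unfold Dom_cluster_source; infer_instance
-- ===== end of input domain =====

-- B groups by a stable sort of the zipped pairs plus one linear run-detection pass
-- instead of A's defaultdict grouping followed by a sort of the keys (objective: alternative).

-- ===== PORT A =====
def cluster_source (source : List String) (ratings : List Int) : List String × List Int :=
  let cluster : PySem.Dict Int (List String) :=
    (source.zip ratings).foldl (fun d p => d.modify p.2 [] (fun v => v ++ [p.1])) PySem.Dict.empty
  let items := PySem.List.sorted cluster.items (fun x => x.1)
  (items.map (fun x => PySem.Str.join " " x.2), items.map (fun x => x.1))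

-- ===== PORT B =====
-- run detector: the outer while loop of Source B (each step consumes one maximal run)
def pvGroupRuns : List (String × Int) → List (Int × List String)
  | [] => []
  | (s, r) :: rest =>
    (r, s :: (rest.takeWhile (fun p => p.2 == r)).map (fun p => p.1)) ::
      pvGroupRuns (rest.dropWhile (fun p => p.2 == r))
termination_by ys => ys.length
decreasing_by
  simp only [List.length_cons]
  exact Nat.lt_succ_of_le (List.length_dropWhile_le _ _)

def cluster_source_alt (source : List String) (ratings : List Int) : List String × List Int :=
  let pairs := PySem.List.sorted (source.zip ratings) (fun p => p.2)
  let groups := pvGroupRuns pairs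
  (groups.map (fun g => PySem.Str.join " " g.2), groups.map (fun g => g.1))

-- ===== PRECONDITION & SPEC =====
def Spec_cluster_source (source : List String) (ratings : List Int) (out : List String × List Int) : Prop := out = cluster_source_alt source ratings
instance (source : List String) (ratings : List Int) (out : List String × List Int) : Decidable (Spec_cluster_source source ratings out) := by unfold Spec_cluster_source; infer_instance

-- ===== CLAIM (what is proved, stated in full; the proofs are below) =====
def Claim_equal_cluster_source : Prop := ∀ (source : List String) (ratings : List Int), Dom_cluster_source source ratings → Spec_cluster_source source ratings (cluster_source source ratings)

-- ===== LEMMAS AND PROOFS =====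

-- inserting x into a key-sorted list: the filter by one key either gains x at the end or is unchanged
theorem pv_insertBy_filter (x : String × Int) (k : Int) :
    ∀ (ys : List (String × Int)), ys.Pairwise (fun a b => a.2 ≤ b.2) →
    (PySem.List.insertBy (fun a b => decide (a.2 < b.2)) x ys).filter (fun p => p.2 == k)
      = if x.2 == k then ys.filter (fun p => p.2 == k) ++ [x] else ys.filter (fun p => p.2 == k) := by
  intro ys
  induction ys with
  | nil =>
    intro _
    by_cases hk : x.2 == k <;> simp [PySem.List.insertBy, hk]
  | cons y ys ih =>
    intro h
    rw [List.pairwise_cons] at h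
    by_cases hlt : x.2 < y.2
    · have hins : PySem.List.insertBy (fun a b => decide (a.2 < b.2)) x (y :: ys) = x :: y :: ys := by
        simp [PySem.List.insertBy, hlt]
      by_cases hk : x.2 == k
      · have hke : x.2 = k := by simpa using hk
        have hnil : (y :: ys).filter (fun p => p.2 == k) = [] := by
          rw [List.filter_eq_nil_iff]
          intro p hp
          have hyp : y.2 ≤ p.2 := by
            rcases List.mem_cons.mp hp with rfl | hp'
            · exact le_rfl
            · exact h.1 p hp'
          simp only [beq_iff_eq]
          omega
        rw [hins, if_pos hk, hnil, List.filter_cons, if_pos hk, hnil]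
        rfl
      · rw [hins, if_neg (by simpa using hk), List.filter_cons, if_neg (by simpa using hk)]
    · have hins : PySem.List.insertBy (fun a b => decide (a.2 < b.2)) x (y :: ys)
          = y :: PySem.List.insertBy (fun a b => decide (a.2 < b.2)) x ys := by
        simp [PySem.List.insertBy, hlt]
      rw [hins, List.filter_cons, List.filter_cons, ih h.2]
      by_cases hy : y.2 == k <;> by_cases hk : x.2 == k <;> simp [hy, hk]

-- stability of PySem.List.sorted with key (·.2): the per-key filters are unchanged
theorem pv_sorted_filter (xs : List (String × Int)) (k : Int) :
    (PySem.List.sorted xs (fun p => p.2)).filter (fun p => p.2 == k)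
      = xs.filter (fun p => p.2 == k) := by
  induction xs using List.reverseRecOn with
  | nil =>
    rw [PySem.List.sorted_eq_foldl_insertBy]
    simp
  | append_singleton xs x ih =>
    rw [PySem.List.sorted_eq_foldl_insertBy, List.foldl_append, List.foldl_cons, List.foldl_nil,
      ← PySem.List.sorted_eq_foldl_insertBy,
      pv_insertBy_filter x k _ (PySem.List.sorted_pairwise xs (fun p => p.2)), ih,
      List.filter_append]
    by_cases hk : x.2 == k <;> simp [hk]

-- under sortedness and a lower bound, takeWhile/dropWhile on (·.2 == r) are the two filters
theorem pv_tw_dw (r : Int) :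
    ∀ (rest : List (String × Int)), (∀ p ∈ rest, r ≤ p.2) → rest.Pairwise (fun a b => a.2 ≤ b.2) →
    rest.takeWhile (fun p => p.2 == r) = rest.filter (fun p => p.2 == r) ∧
    rest.dropWhile (fun p => p.2 == r) = rest.filter (fun p => !(p.2 == r)) := by
  intro rest
  induction rest with
  | nil => intro _ _; simp
  | cons q rest ih =>
    intro hlb hp
    rw [List.pairwise_cons] at hp
    by_cases hq : q.2 == r
    · have hih := ih (fun p hp' => hlb p (List.mem_cons_of_mem _ hp')) hp.2
      constructor
      · rw [List.takeWhile_cons, List.filter_cons]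
        simp [hq, hih.1]
      · rw [List.dropWhile_cons, List.filter_cons]
        simp [hq, hih.2]
    · have hner : ∀ p ∈ q :: rest, ¬ p.2 = r := by
        intro p hp'
        rcases List.mem_cons.mp hp' with rfl | hp''
        · simpa using hq
        · have h1 : q.2 ≤ p.2 := hp.1 p hp''
          have h2 : r ≤ q.2 := hlb q List.mem_cons_self
          have h3 : ¬ q.2 = r := by simpa using hq
          omega
      have hfil : (q :: rest).filter (fun p => p.2 == r) = [] := by
        rw [List.filter_eq_nil_iff]
        intro p hp'
        simpa using hner p hp'
      have hfil2 : (q :: rest).filter (fun p => !(p.2 == r)) = q :: rest := by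
        rw [List.filter_eq_self]
        intro p hp'
        simpa using hner p hp'
      constructor
      · rw [List.takeWhile_cons, hfil]
        simp [hq]
      · rw [List.dropWhile_cons, hfil2]
        simp [hq]

-- characterisation of pvGroupRuns on a key-sorted list: the entries are
-- (key, per-key filtered strings), the keys are strictly increasing and cover exactly ys
theorem pv_groupRuns_char :
    ∀ (ys : List (String × Int)), ys.Pairwise (fun a b => a.2 ≤ b.2) →
    pvGroupRuns ys = ((pvGroupRuns ys).map (fun g => g.1)).map
        (fun kk => (kk, (ys.filter (fun p => p.2 == kk)).map (fun p => p.1))) ∧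
    ((pvGroupRuns ys).map (fun g => g.1)).Pairwise (fun a b => a < b) ∧
    (∀ kk, kk ∈ (pvGroupRuns ys).map (fun g => g.1) ↔ kk ∈ ys.map (fun p => p.2)) := by
  intro ys
  induction ys using pvGroupRuns.induct with
  | case1 => intro _; simp [pvGroupRuns]
  | case2 s r rest ih =>
    intro h
    rw [List.pairwise_cons] at h
    have hlb : ∀ p ∈ rest, r ≤ p.2 := h.1
    have htd := pv_tw_dw r rest hlb h.2
    have hsub : (rest.filter (fun p => !(p.2 == r))).Pairwise (fun a b => a.2 ≤ b.2) :=
      List.Pairwise.sublist List.filter_sublist h.2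
    rw [htd.2] at ih
    obtain ⟨ihc, ihp, ihm⟩ := ih hsub
    have hmemne : ∀ kk ∈ (pvGroupRuns (rest.filter (fun p => !(p.2 == r)))).map (fun g => g.1),
        r < kk := by
      intro kk hkk
      rcases List.mem_map.mp ((ihm kk).mp hkk) with ⟨p, hpmem, hpk⟩
      rcases List.mem_filter.mp hpmem with ⟨hpin, hpne⟩
      have h1 : r ≤ p.2 := hlb p hpin
      have h2 : ¬ p.2 = r := by simpa using hpne
      omega
    refine ⟨?_, ?_, ?_⟩
    · -- contents
      rw [pvGroupRuns, htd.1, htd.2]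
      simp only [List.map_cons]
      refine List.cons_eq_cons.mpr ⟨?_, ?_⟩
      · rw [List.filter_cons]
        simp
      · refine ihc.trans (List.map_congr_left ?_)
        intro kk hkk
        have hne : ¬ kk = r := by
          have := hmemne kk hkk
          omega
        have hrkk : ¬ r = kk := fun hcon => hne hcon.symm
        have hff : (rest.filter (fun p => !(p.2 == r))).filter (fun p => p.2 == kk)
            = rest.filter (fun p => p.2 == kk) := by
          rw [List.filter_filter]
          apply List.filter_congr
          intro a _
          by_cases ha : a.2 = kk
          · simp [ha, hne]
          · simp [ha]
        rw [hff, List.filter_cons]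
        simp [hrkk]
    · -- keys strictly increasing
      rw [pvGroupRuns, htd.2, List.map_cons, List.pairwise_cons]
      exact ⟨hmemne, ihp⟩
    · -- key membership
      intro kk
      rw [pvGroupRuns, htd.2, List.map_cons, List.map_cons, List.mem_cons, List.mem_cons, ihm]
      constructor
      · rintro (rfl | hkk)
        · exact Or.inl rfl
        · rcases List.mem_map.mp hkk with ⟨p, hpmem, hpk⟩
          exact Or.inr (List.mem_map.mpr ⟨p, (List.mem_filter.mp hpmem).1, hpk⟩)
      · rintro (rfl | hkk)
        · exact Or.inl rfl
        · rcases List.mem_map.mp hkk with ⟨p, hpmem, hpk⟩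
          by_cases hpr : p.2 = r
          · exact Or.inl (hpk ▸ hpr.symm ▸ rfl)
          · exact Or.inr (List.mem_map.mpr ⟨p, List.mem_filter.mpr ⟨hpmem, by simpa using hpr⟩, hpk⟩)

-- ===== VERDICT (by name: the statement is the Claim_ definition above) =====
theorem cluster_source_spec : Claim_equal_cluster_source := by
  unfold Claim_equal_cluster_source Spec_cluster_source
  intro source ratings _
  simp only [cluster_source, cluster_source_alt]
  set pairs := source.zip ratings with hpairs
  set d := pairs.foldl (fun d p => d.modify p.2 [] (fun v => v ++ [p.1])) PySem.Dict.empty with hd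
  set ys := PySem.List.sorted pairs (fun p => p.2) with hys
  have hsorted : ys.Pairwise (fun a b => a.2 ≤ b.2) := PySem.List.sorted_pairwise pairs (fun p => p.2)
  obtain ⟨hchar, hpw, hmem⟩ := pv_groupRuns_char ys hsorted
  -- A's dict contents
  have hkeys : d.keys = PySem.Set.ofList (pairs.map (fun p => p.2)) :=
    PySem.Dict.keys_foldl_modify_key pairs (fun p => p.2) [] (fun _ p v => v ++ [p.1]) PySem.Dict.empty
  have hnodup : d.keys.Nodup :=
    PySem.Dict.nodup_keys_foldl_modify_key pairs (fun p => p.2) [] (fun _ p v => v ++ [p.1])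
      PySem.Dict.empty List.nodup_nil
  have hgetD : ∀ k, d.getD k [] = (pairs.filter (fun p => p.2 == k)).map (fun p => p.1) := by
    intro k
    have hg := PySem.Dict.getD_foldl_modify_append (pairs.map (fun p => (p.2, p.1)))
      PySem.Dict.empty k
    rw [List.foldl_map] at hg
    rw [List.filter_map] at hg
    simpa [Function.comp] using hg
  have hitems : d.items = d.keys.map (fun k => (k, (pairs.filter (fun p => p.2 == k)).map (fun p => p.1))) := by
    rw [PySem.Dict.items_eq_map_keys d hnodup []]
    exact List.map_congr_left (fun k _ => by rw [hgetD k])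
  -- B's groups, with stability to pull the filters back to pairs
  have hcharₚ : pvGroupRuns ys = ((pvGroupRuns ys).map (fun g => g.1)).map
      (fun kk => (kk, (pairs.filter (fun p => p.2 == kk)).map (fun p => p.1))) := by
    conv_lhs => rw [hchar]
    exact List.map_congr_left (fun kk _ => by rw [hys, pv_sorted_filter])
  -- the two key lists are permutations of each other
  have hKnodup : ((pvGroupRuns ys).map (fun g => g.1)).Nodup :=
    hpw.imp (fun hab => ne_of_lt hab)
  have hKperm : ((pvGroupRuns ys).map (fun g => g.1)).Perm d.keys := by
    rw [hkeys]
    refine List.perm_of_nodup_nodup_toFinset_eq hKnodup (PySem.Set.nodup_ofList _) ?_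
    ext kk
    simp only [List.mem_toFinset]
    rw [hmem, PySem.Set.mem_ofList]
    constructor
    · intro hk
      have := (PySem.List.sorted_perm pairs (fun p => p.2) false).map (fun p => p.2)
      exact this.mem_iff.mp hk
    · intro hk
      have := (PySem.List.sorted_perm pairs (fun p => p.2) false).map (fun p => p.2)
      exact this.mem_iff.mpr hk
  -- the sorted dict items are exactly B's groups
  have hmain : PySem.List.sorted d.items (fun x => x.1) = pvGroupRuns ys := by
    apply PySem.List.sorted_eq_of_perm_of_pairwise_lt
    · rw [hitems, hcharₚ]
      exact hKperm.map _
    · rw [hcharₚ, List.pairwise_map]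
      simpa using hpw
  rw [hmain]
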